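-- pv_equiv track=rewrite | github.com/jonathonreilly/toy-physics | scripts/frontier_s3_shellability.py | freudenthal_tets_of_cube
-- ===== SOURCE A (Python) =====
-- def freudenthal_tets_of_cube(corner: tuple[int, int, int]) -> list[tuple]:
--     """
--     Subdivide a unit cube into 6 tetrahedra via Freudenthal (staircase)
--     triangulation. Each tet corresponds to a permutation of axes.
--     """
--     x, y, z = corner
--     perms = [
--         (0, 1, 2), (0, 2, 1), (1, 0, 2),
--         (1, 2, 0), (2, 0, 1), (2, 1, 0),
--     ]
--     tets = []
--     for perm in perms:
--         coords = [0, 0, 0]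
--         path = [tuple(coords)]
--         for axis in perm:
--             coords[axis] = 1
--             path.append(tuple(coords))
--         tet_verts = tuple(sorted(
--             [(x + c[0], y + c[1], z + c[2]) for c in path]))
--         tets.append(tet_verts)
--     return tets
-- ===== SOURCE B (Python) =====
-- def freudenthal_tets_of_cube(corner: tuple[int, int, int]) -> list[tuple]:
--     """
--     Freudenthal subdivision: for each axis permutation (a, b, c) keep the
--     cube vertices forming the monotone chain v[a] >= v[b] >= v[c].
--     """
--     x, y, z = corner
--     perms = [
--         (0, 1, 2), (0, 2, 1), (1, 0, 2),
--         (1, 2, 0), (2, 0, 1), (2, 1, 0),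
--     ]
--     cube = [(i, j, k) for i in (0, 1) for j in (0, 1) for k in (0, 1)]
--     tets = []
--     for a, b, c in perms:
--         chain = [v for v in cube if v[a] >= v[b] >= v[c]]
--         tets.append(tuple(sorted((x + u, y + v, z + w) for (u, v, w) in chain)))
--     return tets
-- ===== Notes on version B (the rewrite author's own statement) =====
-- stated objective: alternative
-- what changed: B replaces A's per-permutation staircase-path construction (mutating a coords list axis by axis) with a filter of the 8 cube vertices by the monotone-chain condition v[a] >= v[b] >= v[c], the textbook Kuhn/Freudenthal simplex description.
import Mathlib
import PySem

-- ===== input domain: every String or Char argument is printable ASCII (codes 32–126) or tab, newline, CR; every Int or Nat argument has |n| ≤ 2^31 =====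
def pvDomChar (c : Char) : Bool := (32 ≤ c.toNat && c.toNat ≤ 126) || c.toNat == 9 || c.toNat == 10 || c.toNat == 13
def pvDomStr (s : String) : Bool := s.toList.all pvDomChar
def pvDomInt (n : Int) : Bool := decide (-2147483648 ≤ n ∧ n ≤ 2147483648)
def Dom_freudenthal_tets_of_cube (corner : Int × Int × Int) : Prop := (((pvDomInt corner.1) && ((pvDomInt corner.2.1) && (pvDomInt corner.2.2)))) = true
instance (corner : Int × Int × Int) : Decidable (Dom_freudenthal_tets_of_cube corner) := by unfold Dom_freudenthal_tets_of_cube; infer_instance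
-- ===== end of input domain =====

-- B enumerates the 8 cube vertices and keeps those with the monotone-chain condition
-- v[a] >= v[b] >= v[c], instead of A's staircase-path construction (objective: alternative).
-- Shared helper: both Pythons call sorted() on int 3-tuples; fdSortTriples is the exact port
-- of that call (stable insertion sort under Python's lexicographic tuple comparison on ints).

def fdLexLt (p q : Int × Int × Int) : Bool :=
  decide (p.1 < q.1 ∨ (p.1 = q.1 ∧ (p.2.1 < q.2.1 ∨ (p.2.1 = q.2.1 ∧ p.2.2 < q.2.2))))

def fdInsert (v : Int × Int × Int) : List (Int × Int × Int) → List (Int × Int × Int)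
  | [] => [v]
  | w :: t => if fdLexLt w v then w :: fdInsert v t else v :: w :: t

def fdSortTriples (l : List (Int × Int × Int)) : List (Int × Int × Int) :=
  l.foldl (fun acc v => fdInsert v acc) []

def fdOff (x y z : Int) (c : Int × Int × Int) : Int × Int × Int :=
  (x + c.1, y + c.2.1, z + c.2.2)

-- ===== PORT A =====
def fdTripleOfList (c : List Int) : Int × Int × Int :=
  (c.getD 0 0, c.getD 1 0, c.getD 2 0)

def freudenthal_tets_of_cube (corner : Int × Int × Int) : List (List (Int × Int × Int)) :=
  let x := corner.1
  let y := corner.2.1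
  let z := corner.2.2
  let perms : List (List Nat) :=
    [[0, 1, 2], [0, 2, 1], [1, 0, 2], [1, 2, 0], [2, 0, 1], [2, 1, 0]]
  perms.foldl (fun tets perm =>
    let init : List Int := [0, 0, 0]
    let st := perm.foldl
      (fun (st : List Int × List (List Int)) axis =>
        let coords := st.1.set axis 1
        (coords, st.2 ++ [coords]))
      (init, [init])
    let tet_verts := fdSortTriples
      (st.2.map (fun c => fdOff x y z (fdTripleOfList c)))
    tets ++ [tet_verts]) []

-- ===== PORT B =====
def fdGet (v : Int × Int × Int) (i : Nat) : Int :=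
  if i = 0 then v.1 else if i = 1 then v.2.1 else v.2.2

def freudenthal_tets_of_cube_alt (corner : Int × Int × Int) : List (List (Int × Int × Int)) :=
  let x := corner.1
  let y := corner.2.1
  let z := corner.2.2
  let perms : List (Nat × Nat × Nat) :=
    [(0, 1, 2), (0, 2, 1), (1, 0, 2), (1, 2, 0), (2, 0, 1), (2, 1, 0)]
  let cube : List (Int × Int × Int) :=
    ([0, 1] : List Int).flatMap (fun i =>
      ([0, 1] : List Int).flatMap (fun j =>
        ([0, 1] : List Int).map (fun k => (i, j, k))))
  perms.foldl (fun tets p =>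
    let chain := cube.filter (fun v =>
      fdGet v p.1 ≥ fdGet v p.2.1 && fdGet v p.2.1 ≥ fdGet v p.2.2)
    tets ++ [fdSortTriples (chain.map (fun v => fdOff x y z v))]) []

-- ===== PRECONDITION & SPEC =====
def Spec_freudenthal_tets_of_cube (corner : Int × Int × Int) (out : List (List (Int × Int × Int))) : Prop := out = freudenthal_tets_of_cube_alt corner
instance (corner : Int × Int × Int) (out : List (List (Int × Int × Int))) : Decidable (Spec_freudenthal_tets_of_cube corner out) := by unfold Spec_freudenthal_tets_of_cube; infer_instance

-- ===== CLAIM (what is proved, stated in full; the proofs are below) =====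
def Claim_equal_freudenthal_tets_of_cube : Prop := ∀ (corner : Int × Int × Int), Dom_freudenthal_tets_of_cube corner → Spec_freudenthal_tets_of_cube corner (freudenthal_tets_of_cube corner)

-- ===== LEMMAS AND PROOFS =====

-- A's six staircase paths, evaluated (corner components stay symbolic).
theorem fd_A_eval (x y z : Int) : freudenthal_tets_of_cube (x, y, z) =
    [fdSortTriples ([(0,0,0),(1,0,0),(1,1,0),(1,1,1)].map (fdOff x y z)),
     fdSortTriples ([(0,0,0),(1,0,0),(1,0,1),(1,1,1)].map (fdOff x y z)),
     fdSortTriples ([(0,0,0),(0,1,0),(1,1,0),(1,1,1)].map (fdOff x y z)),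
     fdSortTriples ([(0,0,0),(0,1,0),(0,1,1),(1,1,1)].map (fdOff x y z)),
     fdSortTriples ([(0,0,0),(0,0,1),(1,0,1),(1,1,1)].map (fdOff x y z)),
     fdSortTriples ([(0,0,0),(0,0,1),(0,1,1),(1,1,1)].map (fdOff x y z))] := rfl

-- B's six filtered monotone chains evaluate, in the cube's enumeration order,
-- to exactly the same six vertex lists.
theorem fd_B_eval (x y z : Int) : freudenthal_tets_of_cube_alt (x, y, z) =
    [fdSortTriples ([(0,0,0),(1,0,0),(1,1,0),(1,1,1)].map (fdOff x y z)),
     fdSortTriples ([(0,0,0),(1,0,0),(1,0,1),(1,1,1)].map (fdOff x y z)),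
     fdSortTriples ([(0,0,0),(0,1,0),(1,1,0),(1,1,1)].map (fdOff x y z)),
     fdSortTriples ([(0,0,0),(0,1,0),(0,1,1),(1,1,1)].map (fdOff x y z)),
     fdSortTriples ([(0,0,0),(0,0,1),(1,0,1),(1,1,1)].map (fdOff x y z)),
     fdSortTriples ([(0,0,0),(0,0,1),(0,1,1),(1,1,1)].map (fdOff x y z))] := rfl

-- ===== VERDICT (by name: the statement is the Claim_ definition above) =====
theorem freudenthal_tets_of_cube_spec : Claim_equal_freudenthal_tets_of_cube := by
  intro corner _
  obtain ⟨x, y, z⟩ := corner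
  unfold Spec_freudenthal_tets_of_cube
  rw [fd_A_eval, fd_B_eval]
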